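-- pv_equiv track=rewrite | github.com/honggoff/advent | 2023/02/main.py | combine_sets
-- ===== SOURCE A (Python) =====
-- from copy import copy
--
-- def combine_sets(a, b):
-- 	result = copy(a)
-- 	for color, count in b.items():
-- 		if color in a:
-- 			result[color] = max(count, a[color])
-- 		else:
-- 			result[color] = count
-- 	return result
-- ===== SOURCE B (Python) =====
-- def combine_sets(a, b):
--     groups = {}
--     for color, count in [*a.items(), *b.items()]:
--         groups.setdefault(color, []).append(count)
--     return {color: max(counts) for color, counts in groups.items()}
-- ===== Notes on version B (the rewrite author's own statement) =====
-- stated objective: alternative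
-- what changed: Replaces A's copy-then-overlay mutation with a group-then-reduce pipeline: stage 1 collects every count per color from both dicts into lists (a multimap), stage 2 reduces each list with max; no membership test against a and no in-place overwriting.
import Mathlib
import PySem

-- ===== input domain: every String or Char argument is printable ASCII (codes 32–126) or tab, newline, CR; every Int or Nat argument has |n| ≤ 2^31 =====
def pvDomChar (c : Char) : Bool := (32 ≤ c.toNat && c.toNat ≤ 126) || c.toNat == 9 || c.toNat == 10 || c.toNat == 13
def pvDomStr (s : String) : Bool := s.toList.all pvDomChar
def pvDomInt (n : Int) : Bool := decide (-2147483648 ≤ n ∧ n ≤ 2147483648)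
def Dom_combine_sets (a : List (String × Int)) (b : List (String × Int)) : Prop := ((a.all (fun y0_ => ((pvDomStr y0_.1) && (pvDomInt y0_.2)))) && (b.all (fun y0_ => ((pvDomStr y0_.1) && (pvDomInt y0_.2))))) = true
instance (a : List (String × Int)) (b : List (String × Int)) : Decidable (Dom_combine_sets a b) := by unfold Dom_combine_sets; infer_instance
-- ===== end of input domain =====

-- B replaces A's copy-then-overlay mutation by a group-then-reduce pipeline (collect all counts
-- per color into lists, then take the max of each list); objective: alternative, same cost.

-- ===== PORT A =====
def combine_sets (a : List (String × Int)) (b : List (String × Int)) : List (String × Int) :=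
  -- result = copy(a); for color, count in b.items(): if color in a: result[color] = max(count, a[color]) else: result[color] = count
  (b.foldl (fun result kv =>
      match (PySem.Dict.mk a).get? kv.1 with
      | some av => result.insert kv.1 (max kv.2 av)   -- color in a
      | none    => result.insert kv.1 kv.2)
    (PySem.Dict.mk a)).items

-- ===== PORT B =====
-- max(counts) for a nonempty list of ints (Python max raises on [], never reached here)
def pyMaxInt (vs : List Int) : Int := (PySem.List.max? vs (fun y => y)).getD 0

def combine_sets_alt (a : List (String × Int)) (b : List (String × Int)) : List (String × Int) :=
  -- groups = {}; for color, count in [*a.items(), *b.items()]: groups.setdefault(color, []).append(count)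
  let groups := (a ++ b).foldl (fun g kv => g.modify kv.1 [] (fun l => l ++ [kv.2])) PySem.Dict.empty
  -- return {color: max(counts) for color, counts in groups.items()}
  (groups.items.foldl (fun r kv => r.insert kv.1 (pyMaxInt kv.2)) PySem.Dict.empty).items

-- ===== PRECONDITION & SPEC =====
-- The two arguments stand for Python dicts; Pre_ only rules out association lists with a
-- duplicated key, which represent no Python dict (every real input of A is admitted).
def Pre_combine_sets (a : List (String × Int)) (b : List (String × Int)) : Prop :=
  (a.map Prod.fst).Nodup ∧ (b.map Prod.fst).Nodup
instance (a : List (String × Int)) (b : List (String × Int)) : Decidable (Pre_combine_sets a b) := by unfold Pre_combine_sets; infer_instance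

def pvWitness_combine_sets : (List (String × Int)) × (List (String × Int)) :=
  ([("red", 1), ("blue", 4)], [("red", 3), ("green", 2)])

def Spec_combine_sets (a : List (String × Int)) (b : List (String × Int)) (out : List (String × Int)) : Prop := out = combine_sets_alt a b
instance (a : List (String × Int)) (b : List (String × Int)) (out : List (String × Int)) : Decidable (Spec_combine_sets a b out) := by unfold Spec_combine_sets; infer_instance

-- ===== CLAIM (what is proved, stated in full; the proofs are below) =====
def Claim_equal_combine_sets : Prop := ∀ (a : List (String × Int)) (b : List (String × Int)), Dom_combine_sets a b → Pre_combine_sets a b → Spec_combine_sets a b (combine_sets a b)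

-- ===== LEMMAS AND PROOFS =====

-- A's per-key value: max(count, a[color]) if color in a else count
def adjVal (a : List (String × Int)) (k : String) (v : Int) : Int :=
  match (PySem.Dict.mk a).get? k with
  | some av => max v av
  | none    => v

-- first-match lookup in an association list
theorem get?_mk_eq_find (l : List (String × Int)) (k : String) :
    (PySem.Dict.mk l).get? k = (l.find? (fun p => p.1 == k)).map Prod.snd := by
  induction l with
  | nil => rfl
  | cons p t ih =>
    rw [show (PySem.Dict.mk (p :: t)) = PySem.Dict.mk ((p.1, p.2) :: t) by rfl,
        PySem.Dict.get?_mk_cons, List.find?_cons]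
    by_cases h : p.1 = k
    · simp [h]
    · have hf : (p.1 == k) = false := by simp [h]
      simp [hf, ih]

-- a fold of inserts never touching key k leaves getD k unchanged
theorem getD_foldA_not_mem (a : List (String × Int)) (l : List (String × Int))
    (d : PySem.Dict String Int) (k : String) (h : k ∉ l.map Prod.fst) :
    (l.foldl (fun r kv => r.insert kv.1 (adjVal a kv.1 kv.2)) d).getD k 0 = d.getD k 0 := by
  induction l generalizing d with
  | nil => rfl
  | cons p t ih =>
    simp only [List.map_cons, List.mem_cons] at h
    push Not at h
    simp only [List.foldl_cons]
    rw [ih _ h.2, PySem.Dict.getD_insert_of_ne _ _ _ h.1]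

-- value of A's result at key k, characterised by the first (= only) match in b
theorem getD_foldA (a : List (String × Int)) (b : List (String × Int))
    (d : PySem.Dict String Int) (k : String) (hb : (b.map Prod.fst).Nodup) :
    (b.foldl (fun r kv => r.insert kv.1 (adjVal a kv.1 kv.2)) d).getD k 0
      = match b.find? (fun p => p.1 == k) with
        | some p => adjVal a k p.2
        | none   => d.getD k 0 := by
  induction b generalizing d with
  | nil => rfl
  | cons p t ih =>
    simp only [List.map_cons, List.nodup_cons] at hb
    simp only [List.foldl_cons, List.find?_cons]
    by_cases h : p.1 = k
    · have hk : k ∉ t.map Prod.fst := h ▸ hb.1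
      rw [getD_foldA_not_mem a t _ k hk, h, PySem.Dict.getD_insert_self]
      simp
    · rw [ih _ hb.2]
      simp only [show (p.1 == k) = false by simp [h]]
      cases t.find? (fun p => p.1 == k) <;>
        simp [PySem.Dict.getD_insert_of_ne _ _ _ (Ne.symm h)]

-- in a list with distinct keys, filtering by key keeps at most the first match
theorem filter_map_of_nodup (l : List (String × Int)) (k : String)
    (h : (l.map Prod.fst).Nodup) :
    (l.filter (fun p => p.1 == k)).map Prod.snd
      = match l.find? (fun p => p.1 == k) with
        | some p => [p.2]
        | none   => [] := by
  induction l with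
  | nil => rfl
  | cons p t ih =>
    simp only [List.map_cons, List.nodup_cons] at h
    rw [List.filter_cons, List.find?_cons]
    by_cases hp : p.1 = k
    · have hk : k ∉ t.map Prod.fst := hp ▸ h.1
      have : t.filter (fun p => p.1 == k) = [] := by
        rw [List.filter_eq_nil_iff]
        intro q hq
        simp only [beq_iff_eq]
        exact fun hqk => hk (hqk ▸ List.mem_map_of_mem hq)
      simp [hp, this]
    · simp only [show (p.1 == k) = false by simp [hp]]
      exact ih h.2

-- the crux: A's value at k equals max over all counts collected for k, for every k
theorem value_eq (a : List (String × Int)) (b : List (String × Int)) (k : String)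
    (ha : (a.map Prod.fst).Nodup) (hb : (b.map Prod.fst).Nodup) :
    (match b.find? (fun p => p.1 == k) with
      | some p => adjVal a k p.2
      | none   => (PySem.Dict.mk a).getD k 0)
      = pyMaxInt ((a.filter (fun p => p.1 == k)).map Prod.snd
                  ++ (b.filter (fun p => p.1 == k)).map Prod.snd) := by
  rw [filter_map_of_nodup a k ha, filter_map_of_nodup b k hb,
      PySem.Dict.getD_eq_get?_getD]
  unfold adjVal
  rw [get?_mk_eq_find]
  cases ha' : a.find? (fun p => p.1 == k) <;> cases hb' : b.find? (fun p => p.1 == k) <;>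
    simp [pyMaxInt, max_comm, PySem.List.max?]
  rename_i pa pb
  rcases Int.lt_or_le pa.2 pb.2 with h | h
  · simp [h, max_eq_right h.le]
  · simp [not_lt.mpr h, max_eq_left h]

-- ===== VERDICT (by name: the statement is the Claim_ definition above) =====
theorem combine_sets_spec : Claim_equal_combine_sets := by
  intro a b _ hpre
  obtain ⟨ha, hb⟩ := hpre
  unfold Spec_combine_sets combine_sets combine_sets_alt
  -- A's loop body, written with adjVal
  have hstep : (fun (result : PySem.Dict String Int) (kv : String × Int) =>
      match (PySem.Dict.mk a).get? kv.1 with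
      | some av => result.insert kv.1 (max kv.2 av)
      | none    => result.insert kv.1 kv.2)
      = fun (r : PySem.Dict String Int) (kv : String × Int) => r.insert kv.1 (adjVal a kv.1 kv.2) := by
    funext r kv
    unfold adjVal
    cases h : (PySem.Dict.mk a).get? kv.1 <;> simp
  rw [hstep]
  set result := b.foldl (fun r kv => r.insert kv.1 (adjVal a kv.1 kv.2)) (PySem.Dict.mk a) with hres
  set groups := (a ++ b).foldl (fun g kv => g.modify kv.1 [] (fun l => l ++ [kv.2])) PySem.Dict.empty with hgr
  -- both dicts list the same keys in the same order
  have hka : (PySem.Dict.mk a).keys = a.map Prod.fst := PySem.Dict.keys_mk a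
  have hkeysA : result.keys = PySem.Set.update (a.map Prod.fst) (b.map Prod.fst) := by
    rw [hres, PySem.Dict.keys_foldl_insert_key b Prod.fst
          (fun _ kv => adjVal a kv.1 kv.2) (PySem.Dict.mk a), hka]
  have hkeysB : groups.keys = PySem.Set.update (a.map Prod.fst) (b.map Prod.fst) := by
    rw [hgr, PySem.Dict.keys_foldl_modify_key (a ++ b) Prod.fst []
          (fun _ kv => fun l => l ++ [kv.2]) PySem.Dict.empty]
    rw [show (PySem.Dict.empty : PySem.Dict String (List Int)).keys = ([] : List String) from rfl,
        List.map_append, PySem.Set.update_append, PySem.Set.update_nil_left,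
        PySem.Set.ofList_eq_self_of_nodup _ ha]
  have hndA : result.keys.Nodup := by
    rw [hres]
    exact PySem.Dict.nodup_keys_foldl_insert_key _ _ _ _ (hka ▸ ha)
  have hndB : groups.keys.Nodup := hkeysB ▸ (hkeysA ▸ hndA)
  -- B's comprehension over groups.items is a map (fresh distinct keys into an empty dict)
  rw [PySem.Dict.items_foldl_insert_fresh groups.items Prod.fst (fun kv => pyMaxInt kv.2)
        PySem.Dict.empty (fun p _ => rfl) hndB]
  rw [PySem.Dict.items_eq_map_keys result hndA 0,
      PySem.Dict.items_eq_map_keys groups hndB []]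
  simp only [List.map_map, Function.comp_def]
  rw [hkeysA, hkeysB]
  apply List.map_congr_left
  intro k _
  have hA : result.getD k 0
      = match b.find? (fun p => p.1 == k) with
        | some p => adjVal a k p.2
        | none   => (PySem.Dict.mk a).getD k 0 := getD_foldA a b _ k hb
  have hB : groups.getD k []
      = (a.filter (fun p => p.1 == k)).map Prod.snd
        ++ (b.filter (fun p => p.1 == k)).map Prod.snd := by
    rw [hgr, PySem.Dict.getD_foldl_modify_append (a ++ b) PySem.Dict.empty k]
    simp [List.filter_append]
  rw [hA, hB, value_eq a b k ha hb]
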